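-- pv_equiv track=rewrite | github.com/Was404/metod_prog_6sem | BLOCK-7/E.py | min_groups_for_billboard
-- ===== SOURCE A (Python) =====
-- def min_groups_for_billboard(k, n, m, hieroglyphs):
--     # создание списка для рисунков
--     patterns = [""] * (n * m)
--     index = 0
--     for row in range(n):
--         for col in range(m):
--             for hieroglyph in range(k):
--                 patterns[index] += hieroglyphs[hieroglyph * n + row][col]
--             index += 1
--
--     # определение уникальных шаблонов
--     unique_patterns = set(patterns)
--     return len(unique_patterns)
-- ===== SOURCE B (Python) =====
-- def min_groups_for_billboard(k, n, m, hieroglyphs):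
--     # Sort-then-scan: collect each cell's vertical stack via per-row zip
--     # transposition, sort the stacks, then count group boundaries in one pass
--     # (no hash set: distinct stacks are adjacent after sorting).
--     if n <= 0 or m <= 0:
--         return 0
--     stacks = []
--     for r in range(n):
--         rows = [hieroglyphs[h * n + r] for h in range(k)]
--         stacks.extend(list(zip(*rows))[:m])
--     stacks.sort()
--     groups = 0
--     prev = None
--     for s in stacks:
--         if s != prev:
--             groups += 1
--             prev = s
--     return groups
-- ===== Notes on version B (the rewrite author's own statement) =====
-- stated objective: alternative
-- what changed: A fills n*m pattern strings character by character in a row/col/layer triple loop and takes len(set(...)); B gathers each grid row's layer rows, transposes them with zip into cell stacks, sorts all stacks and counts group boundaries in one linear scan (sort-then-scan distinct count, no hash set).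
-- outside the precondition, e.g. on min_groups_for_billboard(0, 1, 1, []): A returns 1, B returns 0; on min_groups_for_billboard(1, -1, -1, []): A returns 1, B returns 0
import Mathlib
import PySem

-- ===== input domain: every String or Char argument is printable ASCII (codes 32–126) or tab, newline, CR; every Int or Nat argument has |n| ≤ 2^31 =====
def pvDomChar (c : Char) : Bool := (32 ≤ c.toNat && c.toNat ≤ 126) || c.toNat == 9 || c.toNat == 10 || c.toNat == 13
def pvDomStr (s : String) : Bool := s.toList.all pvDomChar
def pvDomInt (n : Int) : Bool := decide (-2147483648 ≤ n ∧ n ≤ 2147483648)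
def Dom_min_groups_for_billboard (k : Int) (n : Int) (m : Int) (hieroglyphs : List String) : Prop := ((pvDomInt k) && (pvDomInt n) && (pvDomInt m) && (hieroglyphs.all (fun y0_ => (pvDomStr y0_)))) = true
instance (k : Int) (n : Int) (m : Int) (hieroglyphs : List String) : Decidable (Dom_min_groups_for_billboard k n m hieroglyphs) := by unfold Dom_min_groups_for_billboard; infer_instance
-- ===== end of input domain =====

-- B replaces A's triple loop + hash set by per-row zip transposition followed by
-- sort-then-scan boundary counting (an alternative algorithm, same count).

-- ===== PORT A =====
-- patterns are kept as List Char (a Python str is its code points); the inner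
-- 'patterns[index] += hieroglyphs[...][col]' loop, whose indexing may raise, is
-- the Option-valued fold below (bind = sequencing of possibly-raising steps).
def pvBuildCell (k : Int) (n : Int) (hs : List String) (row : Int) (col : Int) (s0 : List Char) : Option (List Char) :=
  (PySem.List.pyRange 0 k 1).foldlM (fun acc h =>
    (PySem.List.pyGet? hs (h * n + row)).bind (fun s =>
      (PySem.Str.pyGet? s col).bind (fun ch => some (acc ++ [ch])))) s0

def min_groups_for_billboard (k : Int) (n : Int) (m : Int) (hieroglyphs : List String) : Int :=
  let patterns : List (List Char) := List.replicate (n * m).toNat []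
  match (PySem.List.pyRange 0 n 1).foldlM (fun (st : List (List Char) × Int) row =>
      (PySem.List.pyRange 0 m 1).foldlM (fun (st : List (List Char) × Int) col =>
        (pvBuildCell k n hieroglyphs row col (PySem.List.pyGetD st.1 st.2 [])).bind
          (fun p => some (PySem.List.pySetD st.1 st.2 p, st.2 + 1))) st) (patterns, 0) with
  | some (ps, _) => ((PySem.Set.ofList ps).length : Int)
  | none => 0

-- ===== PORT B =====
-- zip(*rows): columns up to the shortest row, each column a tuple (List Char)
def pvZipCols (rows : List String) : List (List Char) :=
  match (rows.map (fun s => s.toList.length)).min? with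
  | none => []
  | some L => (List.range L).map (fun i => rows.map (fun s => s.toList.getD i ' '))

-- one step of B's boundary-counting scan: 'if s != prev: groups += 1; prev = s'
def pvScanStep (st : Int × Option (List Char)) (s : List Char) : Int × Option (List Char) :=
  if st.2 = some s then st else (st.1 + 1, some s)

def min_groups_for_billboard_alt (k : Int) (n : Int) (m : Int) (hieroglyphs : List String) : Int :=
  if n ≤ 0 ∨ m ≤ 0 then 0
  else
    match (PySem.List.pyRange 0 n 1).foldlM (fun (acc : List (List Char)) r =>
        ((PySem.List.pyRange 0 k 1).mapM (fun h => PySem.List.pyGet? hieroglyphs (h * n + r))).bind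
          (fun rows => some (acc ++ (pvZipCols rows).take m.toNat))) [] with
    | some cellStacks =>
        ((PySem.List.sorted cellStacks (fun x => x) false).foldl pvScanStep (0, none)).1
    | none => 0

-- ===== PRECONDITION & SPEC =====
-- Pre_ excludes (a) inputs where A raises IndexError (a needed layer row missing or
-- shorter than m), and (b) two corners where A still returns but the value is an
-- accident of the '[""] * (n*m)' placeholder list being nonempty while the loops never
-- run (k <= 0 with n,m > 0, and n < 0 with m < 0): there A counts the one placeholder
-- pattern "" and returns 1, while B, which never materialises placeholders, returns 0;
-- both readings of these degenerate boards are defensible.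
def Pre_min_groups_for_billboard (k : Int) (n : Int) (m : Int) (hieroglyphs : List String) : Prop :=
  (0 < n ∧ 0 < m → 0 < k ∧ k * n ≤ (hieroglyphs.length : Int) ∧
      ∀ s ∈ hieroglyphs.take (k * n).toNat, m ≤ (s.toList.length : Int)) ∧
  ¬(n < 0 ∧ m < 0) ∧ ¬(k ≤ 0 ∧ 0 < n ∧ 0 < m)
instance (k : Int) (n : Int) (m : Int) (hieroglyphs : List String) : Decidable (Pre_min_groups_for_billboard k n m hieroglyphs) := by unfold Pre_min_groups_for_billboard; infer_instance

def pvWitness_min_groups_for_billboard : Int × Int × Int × List String := (2, 2, 2, ["ab", "cd", "ab", "xy"])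

def Spec_min_groups_for_billboard (k : Int) (n : Int) (m : Int) (hieroglyphs : List String) (out : Int) : Prop := out = min_groups_for_billboard_alt k n m hieroglyphs
instance (k : Int) (n : Int) (m : Int) (hieroglyphs : List String) (out : Int) : Decidable (Spec_min_groups_for_billboard k n m hieroglyphs out) := by unfold Spec_min_groups_for_billboard; infer_instance

-- ===== CLAIM (what is proved, stated in full; the proofs are below) =====
def Claim_equal_min_groups_for_billboard : Prop := ∀ (k : Int) (n : Int) (m : Int) (hieroglyphs : List String), Dom_min_groups_for_billboard k n m hieroglyphs → Pre_min_groups_for_billboard k n m hieroglyphs → Spec_min_groups_for_billboard k n m hieroglyphs (min_groups_for_billboard k n m hieroglyphs)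

-- ===== LEMMAS AND PROOFS =====

-- the pattern of cell (r, c): the k characters stacked over it, and the flattened cell list
def pvPat (k : Int) (n : Int) (hs : List String) (r : Int) (c : Int) : List Char :=
  (PySem.List.pyRange 0 k 1).map (fun h => (hs.getD (h * n + r).toNat "").toList.getD c.toNat ' ')

def pvCells (n : Int) (m : Int) : List (Int × Int) :=
  (PySem.List.pyRange 0 n 1).flatMap (fun r => (PySem.List.pyRange 0 m 1).map (fun c => (r, c)))

theorem pv_foldlM_flatMap {α β σ : Type} (l : List α) (g : α → List β) (f : σ → β → Option σ) :
    ∀ init : σ, (l.flatMap g).foldlM f init = l.foldlM (fun st x => (g x).foldlM f st) init := by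
  induction l with
  | nil => intro init; rfl
  | cons a t ih => intro init; simp [List.flatMap_cons, List.foldlM_append, List.foldlM_cons, ih]

theorem pv_mapM_some {α β : Type} (g : α → Option β) (f : α → β) :
    ∀ L : List α, (∀ x ∈ L, g x = some (f x)) → L.mapM g = some (L.map f) := by
  intro L
  induction L with
  | nil => intro _; rfl
  | cons a t ih =>
      intro h
      simp only [List.mapM_cons, h a (by simp), List.map_cons, ih (fun x hx => h x (by simp [hx]))]
      rfl

theorem pv_foldlM_eq_some_foldl {α σ : Type} (g : σ → α → Option σ) (u : σ → α → σ) :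
    ∀ (L : List α), (∀ x ∈ L, ∀ st, g st x = some (u st x)) →
    ∀ init, L.foldlM g init = some (L.foldl u init) := by
  intro L
  induction L with
  | nil => intro _ init; rfl
  | cons a t ih =>
      intro h init
      rw [List.foldlM_cons, h a (by simp) init]
      show t.foldlM g (u init a) = _
      rw [List.foldl_cons]
      exact ih (fun x hx => h x (by simp [hx])) (u init a)

theorem pv_idx (k n r h : Int) (hn : 0 < n) (hr : 0 ≤ r) (hrn : r < n)
    (h0 : 0 ≤ h) (h1 : h < k) : 0 ≤ h * n + r ∧ h * n + r < k * n := by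
  refine ⟨by have := mul_nonneg h0 hn.le; omega, ?_⟩
  calc h * n + r < h * n + n := by omega
    _ = (h + 1) * n := by ring
    _ ≤ k * n := mul_le_mul_of_nonneg_right (by omega) hn.le

theorem pv_get_row (k n : Int) (hs : List String) (r h : Int) (hn : 0 < n)
    (hr : 0 ≤ r) (hrn : r < n) (h0 : 0 ≤ h) (h1 : h < k)
    (hlen : k * n ≤ (hs.length : Int)) :
    PySem.List.pyGet? hs (h * n + r) = some (hs.getD (h * n + r).toNat "") ∧
    hs.getD (h * n + r).toNat "" ∈ hs.take (k * n).toNat := by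
  obtain ⟨hi0, hilt⟩ := pv_idx k n r h hn hr hrn h0 h1
  have hblt : h * n + r < (hs.length : Int) := lt_of_lt_of_le hilt hlen
  have hnat : (h * n + r).toNat < hs.length := by omega
  have hgetD : hs.getD (h * n + r).toNat "" = hs[(h * n + r).toNat] :=
    List.getD_eq_getElem hs "" hnat
  refine ⟨by rw [PySem.List.pyGet?_eq_some_getElem hs hi0 hblt, hgetD], ?_⟩
  have htk : (h * n + r).toNat < (hs.take (k * n).toNat).length := by
    simp [List.length_take]; omega
  have : hs.getD (h * n + r).toNat "" = (hs.take (k * n).toNat)[(h * n + r).toNat] := by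
    rw [hgetD, List.getElem_take]
  rw [this]; exact List.getElem_mem htk

theorem pv_foldlM_append_some {α β : Type} (g : α → Option β) (f : α → β) :
    ∀ (L : List α), (∀ x ∈ L, g x = some (f x)) → ∀ s0 : List β,
    L.foldlM (fun acc x => (g x).bind (fun b => some (acc ++ [b]))) s0 = some (s0 ++ L.map f) := by
  intro L
  induction L with
  | nil => intro _ s0; simp [List.foldlM_nil]
  | cons a t ih =>
      intro h s0
      rw [List.foldlM_cons, h a (by simp), Option.bind_some]
      show t.foldlM _ (s0 ++ [f a]) = _
      rw [ih (fun x hx => h x (by simp [hx])) (s0 ++ [f a])]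
      simp

theorem pv_cell_some (k n : Int) (hs : List String) (r c : Int)
    (hn : 0 < n) (hr : 0 ≤ r) (hrn : r < n) (hc : 0 ≤ c)
    (hlen : k * n ≤ (hs.length : Int))
    (hrow : ∀ s ∈ hs.take (k * n).toNat, c < (s.toList.length : Int)) :
    ∀ s0, pvBuildCell k n hs r c s0 = some (s0 ++ pvPat k n hs r c) := by
  intro s0
  have hbody : (fun (acc : List Char) (h : Int) =>
      (PySem.List.pyGet? hs (h * n + r)).bind (fun s =>
        (PySem.Str.pyGet? s c).bind (fun ch => some (acc ++ [ch])))) =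
      (fun (acc : List Char) (h : Int) =>
        ((PySem.List.pyGet? hs (h * n + r)).bind (fun s => PySem.Str.pyGet? s c)).bind
          (fun ch => some (acc ++ [ch]))) := by
    funext acc h; rw [Option.bind_assoc]
  unfold pvBuildCell pvPat
  rw [hbody]
  apply pv_foldlM_append_some
  intro h hmem
  obtain ⟨h0, h1⟩ := PySem.List.mem_pyRange_one.mp hmem
  obtain ⟨hget, hmemtk⟩ := pv_get_row k n hs r h hn hr hrn h0 h1 hlen
  rw [hget, Option.bind_some]
  have hclen : c < ((hs.getD (h * n + r).toNat "").toList.length : Int) := hrow _ hmemtk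
  have hcn : c.toNat < (hs.getD (h * n + r).toNat "").toList.length := by omega
  rw [PySem.Str.pyGet?_eq, PySem.Chars.pyGet?_eq_listPyGet?,
    PySem.List.pyGet?_eq_some_getElem _ hc (by exact_mod_cast hclen),
    List.getD_eq_getElem _ ' ' hcn]

theorem pv_fill (k n : Int) (hs : List String) (f : Int × Int → List Char) :
    ∀ (cs : List (Int × Int)) (pref : List (List Char)),
    (∀ p ∈ cs, ∀ s0, pvBuildCell k n hs p.1 p.2 s0 = some (s0 ++ f p)) →
    cs.foldlM (fun (st : List (List Char) × Int) p =>
        (pvBuildCell k n hs p.1 p.2 (PySem.List.pyGetD st.1 st.2 [])).bind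
          (fun q => some (PySem.List.pySetD st.1 st.2 q, st.2 + 1)))
      (pref ++ List.replicate cs.length [], (pref.length : Int))
    = some (pref ++ cs.map f, (pref.length : Int) + cs.length) := by
  intro cs
  induction cs with
  | nil => intro pref _; simp [List.foldlM_nil]
  | cons p t ih =>
      intro pref h
      rw [List.length_cons, List.replicate_succ, List.foldlM_cons]
      have hget : PySem.List.pyGetD (pref ++ [] :: List.replicate t.length ([] : List Char))
          ((pref.length : Nat) : Int) [] = [] := by
        rw [PySem.List.pyGetD_natCast]
        simp [List.getD_eq_getElem?_getD]
      rw [hget, h p (by simp), Option.bind_some]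
      have hset : PySem.List.pySetD (pref ++ [] :: List.replicate t.length ([] : List Char))
          ((pref.length : Nat) : Int) ([] ++ f p) = (pref ++ [f p]) ++ List.replicate t.length [] := by
        rw [PySem.List.pySetD_natCast, List.set_append]
        simp
      show t.foldlM _ (PySem.List.pySetD _ _ _, (pref.length : Int) + 1) = _
      rw [hset]
      have hlen1 : ((pref.length : Int) + 1) = (((pref ++ [f p]).length : Nat) : Int) := by
        simp
      rw [hlen1, ih (pref ++ [f p]) (fun q hq => h q (by simp [hq]))]
      simp
      omega

theorem pv_A_main (k n m : Int) (hs : List String) (hn : 0 < n) (hm : 0 < m)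
    (hlen : k * n ≤ (hs.length : Int))
    (hrow : ∀ s ∈ hs.take (k * n).toNat, m ≤ (s.toList.length : Int)) :
    min_groups_for_billboard k n m hs =
      ((PySem.Set.ofList ((pvCells n m).map (fun p => pvPat k n hs p.1 p.2))).length : Int) := by
  unfold min_groups_for_billboard
  have hflat : ∀ (init : List (List Char) × Int),
      (PySem.List.pyRange 0 n 1).foldlM (fun (st : List (List Char) × Int) row =>
        (PySem.List.pyRange 0 m 1).foldlM (fun (st : List (List Char) × Int) col =>
          (pvBuildCell k n hs row col (PySem.List.pyGetD st.1 st.2 [])).bind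
            (fun p => some (PySem.List.pySetD st.1 st.2 p, st.2 + 1))) st) init
      = (pvCells n m).foldlM (fun (st : List (List Char) × Int) p =>
          (pvBuildCell k n hs p.1 p.2 (PySem.List.pyGetD st.1 st.2 [])).bind
            (fun q => some (PySem.List.pySetD st.1 st.2 q, st.2 + 1))) init := by
    intro init
    rw [pvCells, pv_foldlM_flatMap]
    simp only [List.foldlM_map]
  have hcell : ∀ p ∈ pvCells n m, ∀ s0,
      pvBuildCell k n hs p.1 p.2 s0 = some (s0 ++ pvPat k n hs p.1 p.2) := by
    intro p hp
    simp only [pvCells, List.mem_flatMap, List.mem_map] at hp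
    obtain ⟨r, hr, c, hc, rfl⟩ := hp
    obtain ⟨hr0, hr1⟩ := PySem.List.mem_pyRange_one.mp hr
    obtain ⟨hc0, hc1⟩ := PySem.List.mem_pyRange_one.mp hc
    exact pv_cell_some k n hs r c hn hr0 hr1 hc0 hlen
      (fun s hsm => lt_of_lt_of_le hc1 (hrow s hsm))
  have hcl : (pvCells n m).length = (n * m).toNat := by
    rw [Int.toNat_mul hn.le hm.le]
    simp [pvCells, List.length_flatMap, PySem.List.length_pyRange_one, List.map_const',
      List.sum_replicate, smul_eq_mul]
  have hfill := pv_fill k n hs (fun p => pvPat k n hs p.1 p.2) (pvCells n m) [] hcell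
  simp only [List.nil_append, List.length_nil, Nat.cast_zero, zero_add] at hfill
  rw [← hcl]
  show (match (PySem.List.pyRange 0 n 1).foldlM _ (List.replicate (pvCells n m).length ([] : List Char), (0 : Int)) with
    | some (ps, _) => ((PySem.Set.ofList ps).length : Int)
    | none => 0) = _
  rw [hflat, hfill]

theorem pv_chunk (k n m : Int) (hs : List String) (r : Int) (hk : 0 < k) (hn : 0 < n) (hm : 0 < m)
    (hr0 : 0 ≤ r) (hr1 : r < n)
    (hlen : k * n ≤ (hs.length : Int))
    (hrow : ∀ s ∈ hs.take (k * n).toNat, m ≤ (s.toList.length : Int)) :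
    (pvZipCols ((PySem.List.pyRange 0 k 1).map (fun h => hs.getD (h * n + r).toNat ""))).take m.toNat
      = (PySem.List.pyRange 0 m 1).map (fun c => pvPat k n hs r c) := by
  have hne : ((PySem.List.pyRange 0 k 1).map (fun h => hs.getD (h * n + r).toNat "")).map
      (fun s => s.toList.length) ≠ [] := by
    have hlcomp : (((PySem.List.pyRange 0 k 1).map (fun h => hs.getD (h * n + r).toNat "")).map
        (fun s => s.toList.length)).length = (k - 0).toNat := by
      simp [PySem.List.length_pyRange_one]
    intro hcon
    rw [hcon] at hlcomp
    simp at hlcomp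
    omega
  unfold pvZipCols
  cases hmin : (((PySem.List.pyRange 0 k 1).map (fun h => hs.getD (h * n + r).toNat "")).map
      (fun s => s.toList.length)).min? with
  | none => exact absurd (List.min?_eq_none_iff.mp hmin) hne
  | some L =>
      obtain ⟨hLmem, hLle⟩ := List.min?_eq_some_iff.mp hmin
      have hmL : m.toNat ≤ L := by
        simp only [List.map_map, List.mem_map] at hLmem
        obtain ⟨h, hh, hLeq⟩ := hLmem
        obtain ⟨h0, h1⟩ := PySem.List.mem_pyRange_one.mp hh
        have hmem := (pv_get_row k n hs r h hn hr0 hr1 h0 h1 hlen).2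
        have hlen2 := hrow _ hmem
        have hLval : L = (hs.getD (h * n + r).toNat "").toList.length := by
          rw [← hLeq]; rfl
        omega
      rw [← List.map_take, List.take_range, min_eq_left hmL]
      rw [show PySem.List.pyRange 0 m 1 = (List.range m.toNat).map Int.ofNat from by
        rw [PySem.List.pyRange_one]
        simp only [sub_zero, zero_add]
        exact List.map_congr_left (fun a _ => rfl)]
      rw [List.map_map]
      apply List.map_congr_left
      intro j hj
      simp [pvPat, List.map_map, Function.comp]

-- ---- sort-then-scan counts distinct elements ----

def pvScan (p : Option (List Char)) : List (List Char) → Int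
  | [] => 0
  | a :: t => if p = some a then pvScan p t else 1 + pvScan (some a) t

theorem pv_foldl_scan : ∀ (S : List (List Char)) (g : Int) (p : Option (List Char)),
    (S.foldl pvScanStep (g, p)).1 = g + pvScan p S := by
  intro S
  induction S with
  | nil => intro g p; simp [pvScan]
  | cons a t ih =>
      intro g p
      rw [List.foldl_cons]
      by_cases h : p = some a
      · subst h
        rw [show pvScanStep (g, some a) a = (g, some a) from by simp [pvScanStep],
          show pvScan (some a) (a :: t) = pvScan (some a) t from by simp [pvScan], ih]
      · rw [show pvScanStep (g, p) a = (g + 1, some a) from by simp [pvScanStep, h],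
          show pvScan p (a :: t) = 1 + pvScan (some a) t from by simp [pvScan, h], ih]
        ring

theorem pv_scan_some : ∀ (S : List (List Char)) (p : List Char),
    S.Pairwise (· ≤ ·) → (∀ x ∈ S, p ≤ x) →
    pvScan (some p) S = ((S.toFinset.erase p).card : Int) := by
  intro S
  induction S with
  | nil => intro p _ _; simp [pvScan]
  | cons a t ih =>
      intro p hpw hle
      have hat : ∀ x ∈ t, a ≤ x := (List.pairwise_cons.mp hpw).1
      have htpw : t.Pairwise (· ≤ ·) := (List.pairwise_cons.mp hpw).2
      have hpa : p ≤ a := hle a (by simp)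
      unfold pvScan
      by_cases h : (some p : Option (List Char)) = some a
      · have hpa' : p = a := Option.some_injective _ h
        rw [if_pos h, ih p htpw (fun x hx => le_trans hpa (hat x hx))]
        subst hpa'
        simp [List.toFinset_cons, Finset.erase_insert_eq_erase]
      · rw [if_neg h]
        have hpna : p ≠ a := fun hc => h (by rw [hc])
        have hplt : p < a := lt_of_le_of_ne hpa hpna
        rw [ih a htpw hat]
        have hnp : p ∉ (a :: t).toFinset := by
          simp only [List.toFinset_cons, Finset.mem_insert, List.mem_toFinset]
          rintro (hc | hc)
          · exact hpna hc
          · exact absurd (hat p hc) (not_le.mpr hplt)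
        rw [Finset.erase_eq_self.mpr hnp, List.toFinset_cons]
        have hea : insert a t.toFinset = insert a (t.toFinset.erase a) := by
          ext x; by_cases hx : x = a <;> simp [hx]
        rw [hea, Finset.card_insert_of_notMem (Finset.notMem_erase a _)]
        push_cast
        ring

theorem pv_scan_none (S : List (List Char)) (hpw : S.Pairwise (· ≤ ·)) :
    pvScan none S = (S.toFinset.card : Int) := by
  cases S with
  | nil => simp [pvScan]
  | cons a t =>
      have hat : ∀ x ∈ t, a ≤ x := (List.pairwise_cons.mp hpw).1
      have htpw : t.Pairwise (· ≤ ·) := (List.pairwise_cons.mp hpw).2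
      unfold pvScan
      rw [if_neg (by simp), pv_scan_some t a htpw hat, List.toFinset_cons]
      have hea : insert a t.toFinset = insert a (t.toFinset.erase a) := by
        ext x; by_cases hx : x = a <;> simp [hx]
      rw [hea, Finset.card_insert_of_notMem (Finset.notMem_erase a _)]
      push_cast
      ring

theorem pv_setLen_toFinset (L : List (List Char)) :
    ((PySem.Set.ofList L : List (List Char)).length : Int) = (L.toFinset.card : Int) := by
  have hnd : (PySem.Set.ofList L : List (List Char)).Nodup := PySem.Set.nodup_ofList L
  have hmem : ∀ x, x ∈ (PySem.Set.ofList L : List (List Char)) ↔ x ∈ L :=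
    fun x => PySem.Set.mem_ofList L x
  have hfs : (PySem.Set.ofList L : List (List Char)).toFinset = L.toFinset := by
    ext x; simp [List.mem_toFinset, hmem]
  rw [← List.toFinset_card_of_nodup hnd, hfs]

theorem pv_sort_scan (L : List (List Char)) :
    ((PySem.List.sorted L (fun x => x) false).foldl pvScanStep (0, none)).1
      = ((PySem.Set.ofList L : List (List Char)).length : Int) := by
  rw [pv_foldl_scan, pv_setLen_toFinset]
  have hperm : (PySem.List.sorted L (fun x => x) false).Perm L := PySem.List.sorted_perm ..
  have hinst : PySem.List.sorted L (fun x => x) false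
      = @PySem.List.sorted (List Char) (List Char) _ (@LinearOrder.toDecidableLT _ inferInstance) L
          (fun x => x) false := by
    congr 1
  have hpw : (PySem.List.sorted L (fun x => x) false).Pairwise (fun a b => a ≤ b) := by
    rw [hinst]
    exact PySem.List.sorted_pairwise L (fun x => x)
  have hfs : (PySem.List.sorted L (fun x => x) false).toFinset = L.toFinset := by
    ext x
    simp [List.mem_toFinset, hperm.mem_iff]
  rw [pv_scan_none _ hpw, hfs]
  ring

theorem pv_foldl_append_flatMap {α β : Type} (l : List α) (g : α → List β) :
    ∀ init : List β, l.foldl (fun st x => st ++ g x) init = init ++ l.flatMap g := by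
  induction l with
  | nil => intro init; simp
  | cons a t ih => intro init; simp [List.foldl_cons, ih, List.flatMap_cons]

theorem pv_B_main (k n m : Int) (hs : List String) (hk : 0 < k) (hn : 0 < n) (hm : 0 < m)
    (hlen : k * n ≤ (hs.length : Int))
    (hrow : ∀ s ∈ hs.take (k * n).toNat, m ≤ (s.toList.length : Int)) :
    min_groups_for_billboard_alt k n m hs =
      ((PySem.Set.ofList ((pvCells n m).map (fun p => pvPat k n hs p.1 p.2))).length : Int) := by
  unfold min_groups_for_billboard_alt
  rw [if_neg (by omega : ¬(n ≤ 0 ∨ m ≤ 0))]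
  have hbody : ∀ r ∈ PySem.List.pyRange 0 n 1, ∀ st : List (List Char),
      ((PySem.List.pyRange 0 k 1).mapM (fun h => PySem.List.pyGet? hs (h * n + r))).bind
        (fun rows => some (st ++ (pvZipCols rows).take m.toNat))
      = some (st ++ (PySem.List.pyRange 0 m 1).map (fun c => pvPat k n hs r c)) := by
    intro r hrmem st
    obtain ⟨hr0, hr1⟩ := PySem.List.mem_pyRange_one.mp hrmem
    rw [pv_mapM_some (fun h => PySem.List.pyGet? hs (h * n + r))
        (fun h => hs.getD (h * n + r).toNat "") _
        (fun h hh => by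
          obtain ⟨h0, h1⟩ := PySem.List.mem_pyRange_one.mp hh
          exact (pv_get_row k n hs r h hn hr0 hr1 h0 h1 hlen).1),
      Option.bind_some, pv_chunk k n m hs r hk hn hm hr0 hr1 hlen hrow]
  rw [pv_foldlM_eq_some_foldl _
      (fun st r => st ++ (PySem.List.pyRange 0 m 1).map (fun c => pvPat k n hs r c))
      _ hbody []]
  have hmapcells : (pvCells n m).map (fun p => pvPat k n hs p.1 p.2)
      = (PySem.List.pyRange 0 n 1).flatMap (fun r => (PySem.List.pyRange 0 m 1).map (fun c => pvPat k n hs r c)) := by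
    simp only [pvCells, List.map_flatMap, List.map_map]
    rfl
  show ((PySem.List.sorted _ (fun x => x) false).foldl pvScanStep (0, none)).1 = _
  rw [pv_foldl_append_flatMap, List.nil_append, pv_sort_scan, ← hmapcells]

theorem pv_degenerate (k n m : Int) (hs : List String)
    (hnm : ¬(0 < n ∧ 0 < m)) (hneg : ¬(n < 0 ∧ m < 0)) :
    min_groups_for_billboard k n m hs = 0 ∧ min_groups_for_billboard_alt k n m hs = 0 := by
  have hB : min_groups_for_billboard_alt k n m hs = 0 := by
    unfold min_groups_for_billboard_alt
    rw [if_pos (by omega)]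
  refine ⟨?_, hB⟩
  have hprod : n * m ≤ 0 := by
    rcases lt_trichotomy n 0 with h | h | h
    · exact mul_nonpos_of_nonpos_of_nonneg h.le (by omega)
    · simp [h]
    · exact mul_nonpos_of_nonneg_of_nonpos h.le (by omega)
  have hrepl : (n * m).toNat = 0 := by omega
  unfold min_groups_for_billboard
  by_cases hn : n ≤ 0
  · rw [PySem.List.pyRange_one_eq_nil hn]
    simp [List.foldlM_nil, hrepl, PySem.Set.ofList]
  · have hm : m ≤ 0 := by omega
    rw [PySem.List.pyRange_one_eq_nil hm]
    have houter := pv_foldlM_eq_some_foldl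
      (fun (st : List (List Char) × Int) (row : Int) =>
        List.foldlM (fun (st : List (List Char) × Int) (col : Int) =>
          (pvBuildCell k n hs row col (PySem.List.pyGetD st.1 st.2 [])).bind
            (fun p => some (PySem.List.pySetD st.1 st.2 p, st.2 + 1))) st [])
      (fun st _ => st) (PySem.List.pyRange 0 n 1) (fun x _ st => rfl)
      (List.replicate (n * m).toNat [], (0 : Int))
    show (match List.foldlM (fun (st : List (List Char) × Int) (row : Int) =>
        List.foldlM (fun (st : List (List Char) × Int) (col : Int) =>
          (pvBuildCell k n hs row col (PySem.List.pyGetD st.1 st.2 [])).bind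
            (fun p => some (PySem.List.pySetD st.1 st.2 p, st.2 + 1))) st [])
        (List.replicate (n * m).toNat [], (0 : Int)) (PySem.List.pyRange 0 n 1) with
      | some (ps, _) => ((PySem.Set.ofList ps).length : Int)
      | none => 0) = 0
    rw [houter, PySem.List.foldl_ignore]
    simp [hrepl, PySem.Set.ofList_eq_foldl]

-- ===== VERDICT (by name: the statement is the Claim_ definition above) =====
theorem min_groups_for_billboard_spec : Claim_equal_min_groups_for_billboard := by
  intro k n m hs _ hpre
  obtain ⟨hmain, hneg, hkle⟩ := hpre
  unfold Spec_min_groups_for_billboard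
  by_cases hpos : 0 < n ∧ 0 < m
  · obtain ⟨hn, hm⟩ := hpos
    obtain ⟨hk, hlen, hrow⟩ := hmain ⟨hn, hm⟩
    rw [pv_A_main k n m hs hn hm hlen hrow, pv_B_main k n m hs hk hn hm hlen hrow]
  · obtain ⟨hA, hB⟩ := pv_degenerate k n m hs hpos hneg
    rw [hA, hB]
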